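-- pv_equiv track=rewrite | github.com/Nickeld28/Learning_Python | Функции/Напишите функцию для нахождения последовательности N четных чисел Фибоначчи.py | even_fib_numbers
-- ===== SOURCE A (Python) =====
-- def even_fib_numbers(n: int):
--     """ Функция возвращает первые n четных чисел Фибоначчи.
--         Принимает один обязательный аргумент n.
--     """
--
--     result, fib = [0], [0, 1]
--     while n > 1:
--         fib_number = fib[-1] + fib[-2]
--         fib.append(fib_number)
--         if fib_number % 2 == 0:
--             result.append(fib_number)
--             n -= 1
--     return result
-- ===== SOURCE B (Python) =====
-- def even_fib_numbers(n: int):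
--     """First n even Fibonacci numbers via the even-only recurrence
--     E_{k+1} = 4*E_k + E_{k-1}, skipping odd terms entirely."""
--     result = [0]
--     prev, cur = 0, 2
--     while len(result) < n:
--         result.append(cur)
--         prev, cur = cur, 4 * cur + prev
--     return result
-- ===== Notes on version B (the rewrite author's own statement) =====
-- stated objective: faster
-- what changed: B generates even Fibonacci numbers directly with the recurrence E_{k+1}=4*E_k+E_{k-1} on two scalars, instead of building the whole Fibonacci list and filtering it with a modulo test.
import Mathlib
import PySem

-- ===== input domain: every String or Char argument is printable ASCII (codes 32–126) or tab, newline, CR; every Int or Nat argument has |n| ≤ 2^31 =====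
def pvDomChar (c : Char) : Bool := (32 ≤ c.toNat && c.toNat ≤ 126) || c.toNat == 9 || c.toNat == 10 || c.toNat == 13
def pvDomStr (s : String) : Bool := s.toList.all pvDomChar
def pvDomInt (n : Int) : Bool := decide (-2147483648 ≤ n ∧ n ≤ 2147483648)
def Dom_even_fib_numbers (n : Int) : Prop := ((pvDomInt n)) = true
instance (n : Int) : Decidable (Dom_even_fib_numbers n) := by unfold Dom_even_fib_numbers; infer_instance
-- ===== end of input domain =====

-- B replaces A's modulo-filter over the full Fibonacci sequence by the even-only recurrence
-- E_{k+1} = 4*E_k + E_{k-1} on two scalars (one loop step per output, no growing fib list).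

-- ===== PORT A =====
-- A's while-loop; the Nat fuel only guards totality (3 * n.toNat iterations provably always
-- suffice: the loop appends an even number at least every 3 iterations, see pvLoopA_eq_loopB).
-- fib has ≥ 2 elements on every reachable state, so pyGetD _ 0 is exactly Python's fib[-1]/fib[-2].
def pvLoopA : Nat → Int → List Int → List Int → List Int
  | 0, _, result, _ => result
  | fuel + 1, n, result, fib =>
    if n > 1 then
      let fib_number := PySem.List.pyGetD fib (-1) 0 + PySem.List.pyGetD fib (-2) 0
      let fib' := fib ++ [fib_number]
      if fib_number % 2 = 0 then pvLoopA fuel (n - 1) (result ++ [fib_number]) fib'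
      else pvLoopA fuel n result fib'
    else result

def even_fib_numbers (n : Int) : List Int :=
  pvLoopA (3 * n.toNat) n [0] [0, 1]

-- ===== PORT B =====
-- B's while-loop; the Nat fuel only guards totality (n.toNat iterations always suffice:
-- result grows by one element per iteration and starts at length 1).
def pvLoopB : Nat → Int → List Int → Int → Int → List Int
  | 0, _, result, _, _ => result
  | fuel + 1, n, result, prev, cur =>
    if (result.length : Int) < n then pvLoopB fuel n (result ++ [cur]) cur (4 * cur + prev)
    else result

def even_fib_numbers_alt (n : Int) : List Int :=
  pvLoopB n.toNat n [0] 0 2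

-- ===== PRECONDITION & SPEC =====
def Spec_even_fib_numbers (n : Int) (out : List Int) : Prop := out = even_fib_numbers_alt n
instance (n : Int) (out : List Int) : Decidable (Spec_even_fib_numbers n out) := by unfold Spec_even_fib_numbers; infer_instance

-- ===== CLAIM (what is proved, stated in full; the proofs are below) =====
def Claim_equal_even_fib_numbers : Prop := ∀ (n : Int), Dom_even_fib_numbers n → Spec_even_fib_numbers n (even_fib_numbers n)

-- ===== LEMMAS AND PROOFS =====
theorem pvGetD_concat_neg2 (xs : List Int) (x d : Int) (h : xs ≠ []) :
    PySem.List.pyGetD (xs ++ [x]) (-2) d = PySem.List.pyGetD xs (-1) d := by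
  rw [PySem.List.pyGetD_neg_ofNat _ 2 _ (by omega)
    (by simp; exact Nat.one_le_iff_ne_zero.mpr (by simpa using h))]
  simp
  rw [List.getElem_append_left (by simpa using Nat.pos_of_ne_zero (by simpa using h))]
  rw [PySem.List.pyGetD_neg_ofNat _ 1 _ (by omega)
    (Nat.one_le_iff_ne_zero.mpr (by simpa using h))]

-- loopB returns `result` whenever the guard is false, for any fuel
theorem pvLoopB_stop (g : Nat) (n : Int) (rs : List Int) (p c : Int)
    (h : ¬ ((rs.length : Int) < n)) : pvLoopB g n rs p c = rs := by
  cases g with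
  | zero => rfl
  | succ g => rw [pvLoopB, if_neg h]

-- the A-loop, entered with the fib list ending in a consecutive (odd, even) Fibonacci pair
-- (a, b), appends exactly the evens that B's two-scalar recurrence produces
theorem pvLoopA_eq_loopB : ∀ (m f g : Nat) (n : Int) (rs pre : List Int) (a b : Int),
    (n - 1).toNat = m → 3 * m ≤ f → m ≤ g → a % 2 = 1 → b % 2 = 0 →
    pvLoopA f n rs (pre ++ [a, b]) = pvLoopB g (n + rs.length - 1) rs b (2 * a + 3 * b) := by
  intro m
  induction m with
  | zero =>
    intro f g n rs pre a b hm hf hg ha hb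
    rw [pvLoopB_stop _ _ _ _ _ (by omega)]
    cases f with
    | zero => rfl
    | succ f => rw [pvLoopA, if_neg (by omega)]
  | succ k ih =>
    intro f g n rs pre a b hm hf hg ha hb
    have hn : n > 1 := by omega
    obtain ⟨f3, rfl⟩ : ∃ f3, f = f3 + 1 + 1 + 1 := ⟨f - 3, by omega⟩
    obtain ⟨g1, rfl⟩ : ∃ g1, g = g1 + 1 := ⟨g - 1, by omega⟩
    have hsplit : pre ++ [a, b] = (pre ++ [a]) ++ [b] := by simp
    have g1' : PySem.List.pyGetD (pre ++ [a, b]) (-1) 0 = b := by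
      rw [hsplit, PySem.List.pyGetD_neg_one_append_singleton]
    have g2' : PySem.List.pyGetD (pre ++ [a, b]) (-2) 0 = a := by
      rw [hsplit, pvGetD_concat_neg2 _ _ _ (by simp),
        PySem.List.pyGetD_neg_one_append_singleton]
    rw [pvLoopA, if_pos hn]
    simp only [g1', g2']
    rw [if_neg (by omega)]
    have g1'' : PySem.List.pyGetD ((pre ++ [a, b]) ++ [b + a]) (-1) 0 = b + a :=
      PySem.List.pyGetD_neg_one_append_singleton ..
    have g2'' : PySem.List.pyGetD ((pre ++ [a, b]) ++ [b + a]) (-2) 0 = b := by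
      rw [pvGetD_concat_neg2 _ _ _ (by simp), g1']
    rw [pvLoopA, if_pos hn]
    simp only [g1'', g2'']
    rw [if_neg (by omega)]
    have g1''' : PySem.List.pyGetD (((pre ++ [a, b]) ++ [b + a]) ++ [b + a + b]) (-1) 0
        = b + a + b := PySem.List.pyGetD_neg_one_append_singleton ..
    have g2''' : PySem.List.pyGetD (((pre ++ [a, b]) ++ [b + a]) ++ [b + a + b]) (-2) 0
        = b + a := by
      rw [pvGetD_concat_neg2 _ _ _ (by simp), g1'']
    rw [pvLoopA, if_pos hn]
    simp only [g1''', g2''']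
    rw [if_pos (by omega)]
    have hshape : (((pre ++ [a, b]) ++ [b + a]) ++ [b + a + b]) ++ [b + a + b + (b + a)]
        = ((pre ++ [a, b]) ++ [b + a]) ++ [b + a + b, b + a + b + (b + a)] := by simp
    rw [hshape,
      ih f3 g1 (n - 1) (rs ++ [b + a + b + (b + a)]) _ (b + a + b) (b + a + b + (b + a))
        (by omega) (by omega) (by omega) (by omega) (by omega)]
    rw [pvLoopB, if_pos (by omega)]
    have hv1 : b + a + b + (b + a) = 2 * a + 3 * b := by ring
    rw [hv1]
    congr 1
    · simp only [List.length_append, List.length_cons, List.length_nil]; push_cast; ring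
    · ring

theorem even_fib_numbers_spec : Claim_equal_even_fib_numbers := by
  intro n _
  unfold Spec_even_fib_numbers even_fib_numbers even_fib_numbers_alt
  by_cases hn : n > 1
  · obtain ⟨f2, hf2⟩ : ∃ f2, 3 * n.toNat = f2 + 1 + 1 := ⟨3 * n.toNat - 2, by omega⟩
    obtain ⟨g0, hg0⟩ : ∃ g0, n.toNat = g0 + 1 := ⟨n.toNat - 1, by omega⟩
    rw [hf2, hg0, pvLoopA, if_pos hn]
    have e1 : PySem.List.pyGetD ([0, 1] : List Int) (-1) 0 = 1 := rfl
    have e2 : PySem.List.pyGetD ([0, 1] : List Int) (-2) 0 = 0 := rfl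
    simp only [e1, e2]
    rw [if_neg (by norm_num)]
    have e3 : PySem.List.pyGetD (([0, 1] : List Int) ++ [1 + 0]) (-1) 0 = 1 + 0 := rfl
    have e4 : PySem.List.pyGetD (([0, 1] : List Int) ++ [1 + 0]) (-2) 0 = 1 := rfl
    rw [pvLoopA, if_pos hn]
    simp only [e3, e4]
    rw [if_pos (by norm_num)]
    have hs : (([0, 1] : List Int) ++ [1 + 0]) ++ [1 + 0 + 1] = [0, 1] ++ [1 + 0, 1 + 0 + 1] := by
      simp
    rw [hs, pvLoopA_eq_loopB (n - 2).toNat f2 g0 (n - 1) ([0] ++ [1 + 0 + 1]) [0, 1] (1 + 0)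
      (1 + 0 + 1) (by omega) (by omega) (by omega) (by norm_num) (by norm_num)]
    conv_rhs => rw [pvLoopB]
    rw [if_pos (by simp; omega)]
    congr 1
    simp; omega
  · rw [pvLoopB_stop _ _ _ _ _ (by simp; omega)]
    rcases Nat.eq_zero_or_pos (3 * n.toNat) with h0 | h0
    · rw [h0]; rfl
    · obtain ⟨f1, hf1⟩ : ∃ f1, 3 * n.toNat = f1 + 1 := ⟨3 * n.toNat - 1, by omega⟩
      rw [hf1, pvLoopA, if_neg hn]
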